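-- pv_equiv track=rewrite | github.com/GuidoM197/TPS-Algo-1 | TP1/primera_entrega_cuatro_en_linea.py | diagonales_superiores
-- ===== SOURCE A (Python) =====
-- def diagonales_superiores(tablero, list_diagonales):
--
--     for i in range(len(tablero[0])):
--         aux = []
--         filas = 0
--         columnas = i
--
--         while filas < len(tablero) and columnas >= 0:
--             aux.append(tablero[filas][columnas])
--             filas += 1
--             columnas -= 1
--         list_diagonales.append(aux)
--
--     return list_diagonales
-- ===== SOURCE B (Python) =====
-- def diagonales_superiores(tablero, list_diagonales):
--     cols = len(tablero[0])
--     buckets = [[] for _ in range(cols)]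
--     for r, fila in enumerate(tablero):
--         for c in range(cols):
--             if r + c < cols:
--                 buckets[r + c].append(fila[c])
--     list_diagonales.extend(buckets)
--     return list_diagonales
-- ===== Notes on version B (the rewrite author's own statement) =====
-- stated objective: alternative
-- what changed: A builds each anti-diagonal with its own top-down while-walk (one pass per column); B makes a single row-major pass over the grid, bucketing each cell into diagonal r+c, so every cell is visited once with no per-diagonal walking state.
import Mathlib
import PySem

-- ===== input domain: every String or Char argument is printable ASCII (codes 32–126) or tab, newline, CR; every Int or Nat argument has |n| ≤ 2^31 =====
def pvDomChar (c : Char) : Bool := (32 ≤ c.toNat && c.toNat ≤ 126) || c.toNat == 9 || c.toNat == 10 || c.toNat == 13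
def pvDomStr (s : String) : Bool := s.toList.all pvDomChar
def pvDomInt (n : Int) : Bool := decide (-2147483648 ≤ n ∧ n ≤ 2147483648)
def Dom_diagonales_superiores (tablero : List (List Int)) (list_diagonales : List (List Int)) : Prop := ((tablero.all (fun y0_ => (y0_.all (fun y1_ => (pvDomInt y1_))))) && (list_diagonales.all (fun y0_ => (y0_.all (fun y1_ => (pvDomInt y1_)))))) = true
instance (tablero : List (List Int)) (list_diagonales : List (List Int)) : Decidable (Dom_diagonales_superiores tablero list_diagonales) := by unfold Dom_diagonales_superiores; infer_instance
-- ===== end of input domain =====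

-- B makes one row-major pass bucketing each cell into diagonal r+c instead of A's per-column
-- top-down while-walks (alternative decomposition, same cost). Both A and B mutate
-- list_diagonales in place (append/extend of the same lists); the theorems are about the
-- return value.

-- ===== PORT A =====
-- the 'while filas < len(tablero) and columnas >= 0' loop; terminates since filas increases
def pvWhileA (tablero : List (List Int)) (filas columnas : Int) (aux : List Int) : List Int :=
  if _h : filas < (tablero.length : Int) ∧ 0 ≤ columnas then
    pvWhileA tablero (filas + 1) (columnas - 1)
      (aux ++ [PySem.List.pyGetD (PySem.List.pyGetD tablero filas []) columnas 0])
  else aux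
termination_by ((tablero.length : Int) - filas).toNat
decreasing_by omega

def diagonales_superiores (tablero : List (List Int)) (list_diagonales : List (List Int)) : List (List Int) :=
  (PySem.List.pyRange 0 ((PySem.List.pyGetD tablero 0 ([] : List Int)).length : Int) 1).foldl
    (fun acc i => acc ++ [pvWhileA tablero 0 i []]) list_diagonales

-- ===== PORT B =====
-- inner 'for c in range(cols): if r + c < cols: buckets[r+c].append(fila[c])'
def pvBucketsStep (cols : Nat) (r : Nat) (fila : List Int) (bs : List (List Int)) : List (List Int) :=
  (PySem.List.pyRange 0 (cols : Int) 1).foldl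
    (fun bs2 c =>
      if (r : Int) + c < (cols : Int) then
        bs2.modify ((r : Int) + c).toNat (fun b => b ++ [PySem.List.pyGetD fila c 0])
      else bs2) bs

def diagonales_superiores_alt (tablero : List (List Int)) (list_diagonales : List (List Int)) : List (List Int) :=
  let cols := (PySem.List.pyGetD tablero 0 ([] : List Int)).length
  let buckets0 := (PySem.List.pyRange 0 (cols : Int) 1).map (fun _ => ([] : List Int))
  let buckets := tablero.zipIdx.foldl (fun bs p => pvBucketsStep cols p.2 p.1 bs) buckets0
  list_diagonales ++ buckets

-- ===== PRECONDITION & SPEC =====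
-- Pre_ excludes exactly the inputs where Python A raises (IndexError): an empty tablero
-- (tablero[0]), and jagged grids where some needed cell tablero[r][c] (c < cols - r) is
-- missing, i.e. len(tablero[r]) + r < len(tablero[0]).  B raises there too.
def Pre_diagonales_superiores (tablero : List (List Int)) (list_diagonales : List (List Int)) : Prop :=
  tablero ≠ [] ∧ ∀ p ∈ tablero.zipIdx, (tablero.headD []).length ≤ p.1.length + p.2
instance (tablero : List (List Int)) (list_diagonales : List (List Int)) : Decidable (Pre_diagonales_superiores tablero list_diagonales) := by unfold Pre_diagonales_superiores; infer_instance
def pvWitness_diagonales_superiores : List (List Int) × List (List Int) := ([[1, 2], [3, 4]], [[7]])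

def Spec_diagonales_superiores (tablero : List (List Int)) (list_diagonales : List (List Int)) (out : List (List Int)) : Prop := out = diagonales_superiores_alt tablero list_diagonales
instance (tablero : List (List Int)) (list_diagonales : List (List Int)) (out : List (List Int)) : Decidable (Spec_diagonales_superiores tablero list_diagonales out) := by unfold Spec_diagonales_superiores; infer_instance

-- ===== CLAIM (what is proved, stated in full; the proofs are below) =====
def Claim_equal_diagonales_superiores : Prop := ∀ (tablero : List (List Int)) (list_diagonales : List (List Int)), Dom_diagonales_superiores tablero list_diagonales → Pre_diagonales_superiores tablero list_diagonales → Spec_diagonales_superiores tablero list_diagonales (diagonales_superiores tablero list_diagonales)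

-- ===== LEMMAS AND PROOFS =====

-- the common closed form: the upper anti-diagonal j of tablero, rows 0..min(len,j+1)-1
def pvDiag (t : List (List Int)) (j : Nat) : List Int :=
  (List.range (min t.length (j + 1))).map (fun f => (t.getD f []).getD (j - f) 0)

-- ---- A side ----
lemma whileA_eq (t : List (List Int)) :
    ∀ (n f : Nat) (c : Int) (aux : List Int), n = t.length - f →
    pvWhileA t (f : Int) c aux =
      aux ++ (List.range (min (t.length - f) (c + 1).toNat)).map
        (fun k => (t.getD (f + k) []).getD (c - (k : Int)).toNat 0) := by
  intro n
  induction n with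
  | zero =>
      intro f c aux hn
      rw [pvWhileA, dif_neg (by intro h; omega)]
      have h0 : min (t.length - f) (c + 1).toNat = 0 := by omega
      simp [h0]
  | succ n ih =>
      intro f c aux hn
      by_cases hc : 0 ≤ c
      · have hf : (f : Int) < (t.length : Int) := by omega
        rw [pvWhileA, dif_pos ⟨hf, hc⟩]
        have hfc : (f : Int) + 1 = ((f + 1 : Nat) : Int) := by push_cast; ring
        rw [hfc, ih (f + 1) (c - 1) _ (by omega)]
        have hcell : PySem.List.pyGetD (PySem.List.pyGetD t (f : Int) []) c 0
            = (t.getD f []).getD c.toNat 0 := by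
          have hcn : c = ((c.toNat : Nat) : Int) := by omega
          rw [PySem.List.pyGetD_natCast]
          conv_lhs => rw [hcn, PySem.List.pyGetD_natCast]
        have hmin : min (t.length - f) (c + 1).toNat
            = min (t.length - (f + 1)) (c - 1 + 1).toNat + 1 := by omega
        rw [hmin, List.range_succ_eq_map, List.map_cons, List.map_map]
        rw [List.append_assoc, List.singleton_append]
        congr 1
        congr 1
        · rw [hcell]; simp
        · apply List.map_congr_left
          intro k _
          simp only [Function.comp_apply]
          have h1 : f + Nat.succ k = f + 1 + k := by omega
          have h2 : c - (Nat.succ k : Nat) = c - 1 - (k : Int) := by push_cast; ring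
          rw [h1, h2]
      · rw [pvWhileA, dif_neg (by intro h; exact hc h.2)]
        have h0 : (c + 1).toNat = 0 := by omega
        simp [h0]

lemma whileA_diag (t : List (List Int)) (j : Nat) :
    pvWhileA t 0 (j : Int) [] = pvDiag t j := by
  have h0 : (0 : Int) = ((0 : Nat) : Int) := rfl
  rw [h0, whileA_eq t (t.length - 0) 0 (j : Int) [] rfl]
  unfold pvDiag
  have hm : min (t.length - 0) (((j : Int)) + 1).toNat = min t.length (j + 1) := by omega
  rw [hm, List.nil_append]
  apply List.map_congr_left
  intro k hk
  rw [List.mem_range] at hk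
  have hkj : k ≤ j := by omega
  have h1 : ((j : Int) - (k : Int)).toNat = j - k := by omega
  rw [Nat.zero_add, h1]

lemma portA_closed (t ld : List (List Int)) :
    diagonales_superiores t ld = ld ++ (List.range (t.getD 0 []).length).map (pvDiag t) := by
  unfold diagonales_superiores
  rw [PySem.List.pyGetD_zero, PySem.List.pyRange_zero_natCast, List.foldl_map,
    PySem.List.foldl_append_singleton_eq_map]
  congr 1
  apply List.map_congr_left
  intro k _
  exact whileA_diag t k

-- ---- B side ----
lemma modify_map_range {α : Type} (cols i : Nat) (h : Nat → α) (u : α → α) :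
    ((List.range cols).map h).modify i u
      = (List.range cols).map (fun j => if j = i then u (h j) else h j) := by
  apply List.ext_getElem
  · simp
  · intro j h1 h2
    simp only [List.length_modify, List.length_map, List.length_range] at h1
    rw [List.getElem_modify]
    simp only [List.getElem_map, List.getElem_range]
    by_cases hij : j = i
    · simp [hij]
    · simp [hij, Ne.symm hij]

lemma bucketsStep_eq (cols r : Nat) (fila : List Int) (g : Nat → List Int) :
    pvBucketsStep cols r fila ((List.range cols).map g)
      = (List.range cols).map (fun j => if r ≤ j then g j ++ [fila.getD (j - r) 0] else g j) := by
  unfold pvBucketsStep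
  rw [PySem.List.pyRange_zero_natCast, List.foldl_map]
  have hstep : (fun (bs2 : List (List Int)) (c : Nat) =>
      if (r : Int) + ((c : Nat) : Int) < ((cols : Nat) : Int) then
        bs2.modify ((r : Int) + ((c : Nat) : Int)).toNat
          (fun b => b ++ [PySem.List.pyGetD fila ((c : Nat) : Int) 0])
      else bs2)
    = (fun (bs2 : List (List Int)) (c : Nat) =>
      if r + c < cols then bs2.modify (r + c) (fun b => b ++ [fila.getD c 0]) else bs2) := by
    funext bs2 c
    simp only [← Nat.cast_add, Nat.cast_lt, Int.toNat_natCast, PySem.List.pyGetD_natCast]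
  rw [hstep]
  have haux : ∀ n, n ≤ cols →
      (List.range n).foldl
        (fun (bs2 : List (List Int)) (c : Nat) =>
          if r + c < cols then bs2.modify (r + c) (fun b => b ++ [fila.getD c 0]) else bs2)
        ((List.range cols).map g)
      = (List.range cols).map
          (fun j => if r ≤ j ∧ j < r + n then g j ++ [fila.getD (j - r) 0] else g j) := by
    intro n
    induction n with
    | zero =>
        intro _
        simp only [List.range_zero, List.foldl_nil]
        symm
        apply List.map_congr_left
        intro j _
        rw [if_neg (by omega)]
    | succ n ihn =>
        intro hn
        rw [List.range_succ, List.foldl_append, ihn (by omega), List.foldl_cons, List.foldl_nil]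
        by_cases hrn : r + n < cols
        · rw [if_pos hrn, modify_map_range]
          apply List.map_congr_left
          intro j hj
          rw [List.mem_range] at hj
          by_cases hje : j = r + n
          · subst hje
            rw [if_pos rfl, if_neg (by omega), if_pos (by omega), Nat.add_sub_cancel_left]
          · rw [if_neg hje]
            by_cases h1 : r ≤ j ∧ j < r + n
            · rw [if_pos h1, if_pos (by omega)]
            · rw [if_neg h1, if_neg (by omega)]
        · rw [if_neg hrn]
          apply List.map_congr_left
          intro j hj
          rw [List.mem_range] at hj
          by_cases h1 : r ≤ j
          · rw [if_pos ⟨h1, by omega⟩, if_pos ⟨h1, by omega⟩]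
          · rw [if_neg (by omega), if_neg (by omega)]
  rw [haux cols le_rfl]
  apply List.map_congr_left
  intro j hj
  rw [List.mem_range] at hj
  by_cases h1 : r ≤ j
  · rw [if_pos ⟨h1, by omega⟩, if_pos h1]
  · rw [if_neg (by omega), if_neg h1]

-- sequential contribution of the remaining rows (starting at absolute row index r0) to bucket j
def pvG (rows : List (List Int)) (r0 j : Nat) : List Int :=
  match rows with
  | [] => []
  | fila :: rest => (if r0 ≤ j then [fila.getD (j - r0) 0] else []) ++ pvG rest (r0 + 1) j

lemma outer_fold (cols : Nat) :
    ∀ (rows : List (List Int)) (r0 : Nat) (g : Nat → List Int),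
    (rows.zipIdx r0).foldl (fun bs p => pvBucketsStep cols p.2 p.1 bs) ((List.range cols).map g)
      = (List.range cols).map (fun j => g j ++ pvG rows r0 j) := by
  intro rows
  induction rows with
  | nil =>
      intro r0 g
      simp [pvG]
  | cons fila rest ih =>
      intro r0 g
      rw [List.zipIdx_cons, List.foldl_cons]
      have h1 : pvBucketsStep cols (fila, r0).2 (fila, r0).1 ((List.range cols).map g)
          = (List.range cols).map
              (fun j => if r0 ≤ j then g j ++ [fila.getD (j - r0) 0] else g j) :=
        bucketsStep_eq cols r0 fila g
      rw [h1, ih (r0 + 1)]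
      apply List.map_congr_left
      intro j _
      by_cases h : r0 ≤ j <;> simp [pvG, h, List.append_assoc]

lemma pvG_closed (j : Nat) :
    ∀ (rows : List (List Int)) (r0 : Nat),
    pvG rows r0 j = (List.range (min rows.length (j + 1 - r0))).map
      (fun k => (rows.getD k []).getD (j - (r0 + k)) 0) := by
  intro rows
  induction rows with
  | nil => intro r0; simp [pvG]
  | cons fila rest ih =>
      intro r0
      by_cases h : r0 ≤ j
      · have hm : min (fila :: rest).length (j + 1 - r0)
            = min rest.length (j + 1 - (r0 + 1)) + 1 := by
          simp only [List.length_cons]; omega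
        rw [hm, List.range_succ_eq_map, List.map_cons, List.map_map]
        simp only [pvG, if_pos h, List.singleton_append]
        rw [ih (r0 + 1)]
        congr 1
        apply List.map_congr_left
        intro k _
        simp only [Function.comp_apply, Nat.succ_eq_add_one, List.getD_cons_succ]
        have hik : r0 + (k + 1) = r0 + 1 + k := by omega
        rw [hik]
      · have hm : min (fila :: rest).length (j + 1 - r0) = 0 := by omega
        have hm2 : min rest.length (j + 1 - (r0 + 1)) = 0 := by omega
        simp only [pvG, if_neg h, List.nil_append, hm, List.range_zero, List.map_nil]
        rw [ih (r0 + 1), hm2]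
        simp

lemma portB_closed (t ld : List (List Int)) :
    diagonales_superiores_alt t ld = ld ++ (List.range (t.getD 0 []).length).map (pvDiag t) := by
  show ld ++ (t.zipIdx.foldl
      (fun bs p => pvBucketsStep (PySem.List.pyGetD t 0 ([] : List Int)).length p.2 p.1 bs)
      ((PySem.List.pyRange 0 (((PySem.List.pyGetD t 0 ([] : List Int)).length : Nat) : Int) 1).map
        (fun _ => ([] : List Int)))) = _
  rw [PySem.List.pyGetD_zero, PySem.List.pyRange_zero_natCast, List.map_map]
  rw [outer_fold ((t.getD 0 []).length) t 0 ((fun _ => ([] : List Int)) ∘ (fun k : Nat => (k : Int)))]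
  congr 1
  apply List.map_congr_left
  intro j _
  simp only [Function.comp_apply, List.nil_append]
  rw [pvG_closed j t 0]
  unfold pvDiag
  have hm : min t.length (j + 1 - 0) = min t.length (j + 1) := by omega
  rw [hm]
  apply List.map_congr_left
  intro k _
  rw [Nat.zero_add]

-- ===== VERDICT (by name: the statement is the Claim_ definition above) =====
theorem diagonales_superiores_spec : Claim_equal_diagonales_superiores := by
  intro t ld _ _
  unfold Spec_diagonales_superiores
  rw [portA_closed, portB_closed]
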